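-- pv_equiv track=rewrite | github.com/ProphetSunboy/python_tasks | get_biggest_three_rhombus_sums_in_a_grid.py | getBiggestThree
-- ===== SOURCE A (Python) =====
-- def getBiggestThree(grid: list[list[int]]) -> list[int]:
--     """
--     Given an m x n integer matrix grid, returns the biggest three distinct
--     rhombus border sums in the grid in descending order.
--     A rhombus sum is defined as the sum of the elements that form the
--     border of a regular rhombus (a square rotated 45 degrees), with each
--     corner centered in a grid cell. The rhombus can have an area of 0
--     (single cell).
--
--     If there are fewer than three distinct rhombus sums,
--     returns all of them.
--
--     Args:
--         grid (list[list[int]]): 2D grid of integers.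
--
--     Returns:
--         list[int]: The largest three distinct rhombus border sums in
--         descending order.
--
--     Example:
--         Input: grid = [[3,4,5,1,3],
--                        [3,3,4,2,3],
--                        [20,30,200,40,10],
--                        [1,5,5,4,1],
--                        [4,3,2,2,5]]
--         Output: [228,216,211]
--
--     Time Complexity: O(m * n * min(m, n)), where m and n are the number of
--             rows and columns.
--     Space Complexity: O(m * n), due to auxiliary lists for diagonals.
--     """
--     m, n = len(grid), len(grid[0])
--     d1 = [[0] * (n + 2) for _ in range(m + 2)]
--     d2 = [[0] * (n + 2) for _ in range(m + 2)]
--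
--     for r in range(m):
--         for c in range(n):
--             d1[r + 1][c + 1] = grid[r][c] + d1[r][c]
--             d2[r + 1][c + 1] = grid[r][c] + d2[r][c + 2]
--
--     top_sums = set()
--
--     for r in range(m):
--         for c in range(n):
--             top_sums.add(grid[r][c])
--
--             for L in range(1, m):
--                 top_r, top_c = r, c
--                 bott_r, bott_c = r + 2 * L, c
--                 left_r, left_c = r + L, c - L
--                 right_r, right_c = r + L, c + L
--
--                 if bott_r >= m or left_c < 0 or right_c >= n:
--                     break
--
--                 s1 = d2[left_r + 1][left_c + 1] - d2[top_r][top_c + 2]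
--                 s2 = d1[bott_r + 1][bott_c + 1] - d1[left_r][left_c]
--                 s3 = d2[bott_r + 1][bott_c + 1] - d2[right_r][right_c + 2]
--                 s4 = d1[right_r + 1][right_c + 1] - d1[top_r][top_c]
--
--                 current_sum = (
--                     s1
--                     + s2
--                     + s3
--                     + s4
--                     - grid[top_r][top_c]
--                     - grid[bott_r][bott_c]
--                     - grid[left_r][left_c]
--                     - grid[right_r][right_c]
--                 )
--                 top_sums.add(current_sum)
--
--     return sorted(list(top_sums), reverse=True)[:3]
-- ===== SOURCE B (Python) =====
-- def getBiggestThree(grid: list[list[int]]) -> list[int]: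
--     """Same result as A, but without the d1/d2 prefix-sum tables: each rhombus
--     border sum is obtained by walking its four diagonal edges directly."""
--     m, n = len(grid), len(grid[0])
--     sums = set()
--     for r in range(m):
--         for c in range(n):
--             sums.add(grid[r][c])
--             for L in range(1, m):
--                 if r + 2 * L >= m or c - L < 0 or c + L >= n:
--                     break
--                 s = 0
--                 for i in range(L):
--                     s += (grid[r + i][c - i]
--                           + grid[r + L + i][c - L + i]
--                           + grid[r + 2 * L - i][c + i]
--                           + grid[r + L - i][c + L - i])
--                 sums.add(s)
--     return sorted(sums, reverse=True)[:3]
-- ===== Notes on version B (the rewrite author's own statement) =====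
-- stated objective: simpler
-- what changed: B drops A's d1/d2 diagonal prefix-sum tables and instead sums each rhombus border directly by walking its four diagonal edges (each corner counted once), keeping the same center/size enumeration and break condition.
import Mathlib
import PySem

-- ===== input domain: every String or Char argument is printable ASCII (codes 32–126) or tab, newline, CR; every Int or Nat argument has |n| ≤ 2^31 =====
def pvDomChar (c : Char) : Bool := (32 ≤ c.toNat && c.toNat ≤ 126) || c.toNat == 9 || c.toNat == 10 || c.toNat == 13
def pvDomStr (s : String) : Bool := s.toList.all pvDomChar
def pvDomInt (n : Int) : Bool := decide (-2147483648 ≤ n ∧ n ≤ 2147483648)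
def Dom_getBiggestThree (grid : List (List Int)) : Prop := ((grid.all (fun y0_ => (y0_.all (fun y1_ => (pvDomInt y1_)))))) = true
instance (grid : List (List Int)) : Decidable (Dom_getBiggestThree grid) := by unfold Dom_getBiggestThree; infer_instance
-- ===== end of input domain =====

-- B replaces A's d1/d2 diagonal prefix-sum tables by a direct walk of the four
-- border edges of each rhombus (objective: simpler — same enumeration, no tables).

-- ===== PORT A =====
-- grid[r][c]; every index this is used at is a loop variable or a guarded
-- difference, proven ≥ 0 and in range on every executed path, so plain getD is exact.
def pvG (grid : List (List Int)) (r c : Nat) : Int := (grid.getD r []).getD c 0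

-- d[i][j] read / in-place write d[i][j] = v (all uses are in range)
def pvGet2 (mat : List (List Int)) (i j : Nat) : Int := (mat.getD i []).getD j 0
def pvSet2 (mat : List (List Int)) (i j : Nat) (v : Int) : List (List Int) :=
  mat.set i ((mat.getD i []).set j v)

-- the first double loop of A: builds the two diagonal prefix tables d1, d2
def pvBuildTables (grid : List (List Int)) (m n : Nat) : List (List Int) × List (List Int) :=
  (List.range m).foldl (fun st r =>
    (List.range n).foldl (fun (st : List (List Int) × List (List Int)) c =>
      (pvSet2 st.1 (r+1) (c+1) (pvG grid r c + pvGet2 st.1 r c),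
       pvSet2 st.2 (r+1) (c+1) (pvG grid r c + pvGet2 st.2 r (c+2)))) st)
    (List.replicate (m+2) (List.replicate (n+2) (0:Int)),
     List.replicate (m+2) (List.replicate (n+2) (0:Int)))

-- inner 'for L in range(1, m): … if …: break …' loop of A (break = stop recursing)
def pvRhombA (grid d1 d2 : List (List Int)) (m n r c : Nat) (L : Nat)
    (acc : PySem.Set Int) : PySem.Set Int :=
  if _h : L < m then
    -- top=(r,c)  bott=(r+2L,c)  left=(r+L,c-L)  right=(r+L,c+L); Python's
    -- guard 'left_c < 0' is checked on the Int difference, so .toNat after it is exact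
    if r + 2*L ≥ m ∨ (c : Int) - (L : Int) < 0 ∨ c + L ≥ n then acc
    else
      -- cur = s1 + s2 + s3 + s4 minus the four corner cells
      pvRhombA grid d1 d2 m n r c (L+1) (PySem.Set.add acc
        ((pvGet2 d2 (r+L+1) (((c : Int) - (L : Int)).toNat+1) - pvGet2 d2 r (c+2))
         + (pvGet2 d1 (r+2*L+1) (c+1) - pvGet2 d1 (r+L) ((c : Int) - (L : Int)).toNat)
         + (pvGet2 d2 (r+2*L+1) (c+1) - pvGet2 d2 (r+L) (c+L+2))
         + (pvGet2 d1 (r+L+1) (c+L+1) - pvGet2 d1 r c)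
         - pvG grid r c - pvG grid (r+2*L) c
         - pvG grid (r+L) ((c : Int) - (L : Int)).toNat - pvG grid (r+L) (c+L)))
  else acc
termination_by m - L

def getBiggestThree (grid : List (List Int)) : List Int :=
  let m := grid.length
  let n := (grid.getD 0 []).length
  let td := pvBuildTables grid m n
  let s : PySem.Set Int := (List.range m).foldl (fun acc r =>
    (List.range n).foldl (fun acc c =>
      pvRhombA grid td.1 td.2 m n r c 1 (PySem.Set.add acc (pvG grid r c))) acc)
    PySem.Set.empty
  PySem.List.slice (PySem.List.sorted s (fun x => x) true) none (some 3)

-- ===== PORT B =====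
-- 'for i in range(L): s += grid[…]+grid[…]+grid[…]+grid[…]' — the four edges,
-- each including exactly one corner; all indices are in range under the guard.
def pvBorderSum (grid : List (List Int)) (r c L : Nat) : Int :=
  (List.range L).foldl (fun s i =>
    s + (pvG grid (r+i) (c-i) + pvG grid (r+L+i) (c-L+i)
         + pvG grid (r+2*L-i) (c+i) + pvG grid (r+L-i) (c+L-i))) 0

def pvRhombB (grid : List (List Int)) (m n r c : Nat) (L : Nat)
    (acc : PySem.Set Int) : PySem.Set Int :=
  if _h : L < m then
    if r + 2*L ≥ m ∨ (c : Int) - (L : Int) < 0 ∨ c + L ≥ n then acc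
    else pvRhombB grid m n r c (L+1) (PySem.Set.add acc (pvBorderSum grid r c L))
  else acc
termination_by m - L

def getBiggestThree_alt (grid : List (List Int)) : List Int :=
  let m := grid.length
  let n := (grid.getD 0 []).length
  let s : PySem.Set Int := (List.range m).foldl (fun acc r =>
    (List.range n).foldl (fun acc c =>
      pvRhombB grid m n r c 1 (PySem.Set.add acc (pvG grid r c))) acc)
    PySem.Set.empty
  PySem.List.slice (PySem.List.sorted s (fun x => x) true) none (some 3)

-- ===== PRECONDITION & SPEC =====
-- Pre_ excludes exactly the inputs where Python A raises IndexError: the empty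
-- grid (grid[0]) and grids with a row shorter than row 0 (grid[r][c], c < len(grid[0])).
def Pre_getBiggestThree (grid : List (List Int)) : Prop :=
  grid ≠ [] ∧ ∀ row ∈ grid, (grid.headD []).length ≤ row.length
instance (grid : List (List Int)) : Decidable (Pre_getBiggestThree grid) := by
  unfold Pre_getBiggestThree; infer_instance

def pvWitness_getBiggestThree : List (List Int) :=
  [[3,4,5,1,3],[3,3,4,2,3],[20,30,200,40,10],[1,5,5,4,1],[4,3,2,2,5]]

def Spec_getBiggestThree (grid : List (List Int)) (out : List Int) : Prop := out = getBiggestThree_alt grid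
instance (grid : List (List Int)) (out : List Int) : Decidable (Spec_getBiggestThree grid out) := by unfold Spec_getBiggestThree; infer_instance

-- ===== CLAIM (what is proved, stated in full; the proofs are below) =====
def Claim_equal_getBiggestThree : Prop := ∀ (grid : List (List Int)), Dom_getBiggestThree grid → Pre_getBiggestThree grid → Spec_getBiggestThree grid (getBiggestThree grid)

-- ===== LEMMAS AND PROOFS =====

-- recursive characterisations of the two prefix tables
def pvD1 (grid : List (List Int)) (m n : Nat) : Nat → Nat → Int := fun i j =>
  if 1 ≤ i ∧ i ≤ m ∧ 1 ≤ j ∧ j ≤ n then pvG grid (i-1) (j-1) + pvD1 grid m n (i-1) (j-1) else 0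
termination_by i _ => i

def pvD2 (grid : List (List Int)) (m n : Nat) : Nat → Nat → Int := fun i j =>
  if 1 ≤ i ∧ i ≤ m ∧ 1 ≤ j ∧ j ≤ n then pvG grid (i-1) (j-1) + pvD2 grid m n (i-1) (j+1) else 0
termination_by i _ => i

-- basic facts about pvGet2 / pvSet2
theorem pvLength_set2 (d : List (List Int)) (i j : Nat) (v : Int) :
    (pvSet2 d i j v).length = d.length := by simp [pvSet2]

theorem pvRows_set2 (d : List (List Int)) (i j : Nat) (v : Int) (n : Nat)
    (h : ∀ row ∈ d, row.length = n) : ∀ row ∈ pvSet2 d i j v, row.length = n := by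
  rcases Nat.lt_or_ge i d.length with hi | hi
  · intro row hrow
    rcases List.mem_or_eq_of_mem_set hrow with h1 | h1
    · exact h _ h1
    · subst h1
      have hg : d.getD i [] = d[i] := by
        simp [List.getD, List.getElem?_eq_getElem hi]
      rw [List.length_set, hg]
      exact h _ (List.getElem_mem hi)
  · have : pvSet2 d i j v = d := by
      unfold pvSet2; exact List.set_eq_of_length_le hi
    rw [this]; exact h

theorem pvGet2_set2_same (d : List (List Int)) (i j : Nat) (v : Int)
    (hi : i < d.length) (hj : j < (d.getD i []).length) :
    pvGet2 (pvSet2 d i j v) i j = v := by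
  have hg : d[i]?.getD [] = d[i] := by simp [List.getElem?_eq_getElem hi]
  have hj2 : j < d[i].length := by
    have : d.getD i [] = d[i] := by simp [List.getD_eq_getElem?_getD, hg]
    rwa [this] at hj
  unfold pvGet2 pvSet2
  simp only [List.getD_eq_getElem?_getD]
  rw [hg, List.getElem?_set_self (by simpa using hi), Option.getD_some,
      List.getElem?_set_self (by simpa using hj2), Option.getD_some]

theorem pvGet2_set2_ne (d : List (List Int)) (i j i' j' : Nat) (v : Int)
    (h : i ≠ i' ∨ j ≠ j') : pvGet2 (pvSet2 d i j v) i' j' = pvGet2 d i' j' := by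
  rcases h with h | h
  · unfold pvGet2 pvSet2
    simp only [List.getD_eq_getElem?_getD]
    rw [List.getElem?_set_ne h]
  · rcases eq_or_ne i i' with rfl | hne
    · rcases Nat.lt_or_ge i d.length with hi | hi
      · have hg : d[i]?.getD [] = d[i] := by simp [List.getElem?_eq_getElem hi]
        unfold pvGet2 pvSet2
        simp only [List.getD_eq_getElem?_getD]
        rw [hg, List.getElem?_set_self (by simpa using hi), Option.getD_some,
            List.getElem?_set_ne h]
      · have : pvSet2 d i j v = d := by
          unfold pvSet2; exact List.set_eq_of_length_le hi
        rw [this]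
    · unfold pvGet2 pvSet2
      simp only [List.getD_eq_getElem?_getD]
      rw [List.getElem?_set_ne hne]

-- the invariant tying a table to its intended contents
def pvInv (d : List (List Int)) (m n : Nat) (F : Nat → Nat → Int) : Prop :=
  d.length = m + 2 ∧ (∀ row ∈ d, row.length = n + 2) ∧ ∀ i j, pvGet2 d i j = F i j

theorem pvInv_set (d : List (List Int)) (m n : Nat) (F : Nat → Nat → Int)
    (hInv : pvInv d m n F) (i j : Nat) (hi : i < m + 2) (hj : j < n + 2) (v : Int) :
    pvInv (pvSet2 d i j v) m n (fun i' j' => if i' = i ∧ j' = j then v else F i' j') := by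
  obtain ⟨hlen, hrows, hget⟩ := hInv
  have hi' : i < d.length := by omega
  have hg : d.getD i [] = d[i] := by simp [List.getD, List.getElem?_eq_getElem hi']
  have hrowlen : (d.getD i []).length = n + 2 := by
    rw [hg]; exact hrows _ (List.getElem_mem hi')
  refine ⟨by rw [pvLength_set2, hlen], pvRows_set2 _ _ _ _ _ hrows, ?_⟩
  intro i' j'
  by_cases hij : i' = i ∧ j' = j
  · obtain ⟨rfl, rfl⟩ := hij
    rw [pvGet2_set2_same d i' j' v hi' (by omega)]
    simp
  · rw [pvGet2_set2_ne d i j i' j' v (by tauto)]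
    simp only [hget]
    rw [if_neg (by tauto)]

-- ===== table characterisation =====

-- contents after fully processing rows 0..k-1
def pvF1 (grid : List (List Int)) (m n k : Nat) : Nat → Nat → Int := fun i j =>
  if i ≤ k then pvD1 grid m n i j else 0
def pvF2 (grid : List (List Int)) (m n k : Nat) : Nat → Nat → Int := fun i j =>
  if i ≤ k then pvD2 grid m n i j else 0

theorem pvD1_zero_out (grid : List (List Int)) (m n i j : Nat)
    (h : ¬ (1 ≤ i ∧ i ≤ m ∧ 1 ≤ j ∧ j ≤ n)) : pvD1 grid m n i j = 0 := by
  rw [pvD1]; simp [h]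

theorem pvD2_zero_out (grid : List (List Int)) (m n i j : Nat)
    (h : ¬ (1 ≤ i ∧ i ≤ m ∧ 1 ≤ j ∧ j ≤ n)) : pvD2 grid m n i j = 0 := by
  rw [pvD2]; simp [h]

-- pointwise congruence for the invariant
theorem pvInv_congr {d : List (List Int)} {m n : Nat} {F F' : Nat → Nat → Int}
    (h : pvInv d m n F) (hFF : ∀ i j, F i j = F' i j) : pvInv d m n F' :=
  ⟨h.1, h.2.1, fun i j => (h.2.2 i j).trans (hFF i j)⟩

-- intended contents of d1/d2 while row r is being filled up to column cc
def pvG1 (grid : List (List Int)) (m n r cc : Nat) : Nat → Nat → Int := fun i j =>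
  if i ≤ r then pvD1 grid m n i j
  else if i = r+1 ∧ 1 ≤ j ∧ j ≤ cc then pvD1 grid m n i j else 0
def pvG2 (grid : List (List Int)) (m n r cc : Nat) : Nat → Nat → Int := fun i j =>
  if i ≤ r then pvD2 grid m n i j
  else if i = r+1 ∧ 1 ≤ j ∧ j ≤ cc then pvD2 grid m n i j else 0

-- inner column loop for d1
theorem pvInner1 (grid : List (List Int)) (m n r : Nat) (hr : r < m) :
    ∀ cc, cc ≤ n → ∀ d, pvInv d m n (pvG1 grid m n r 0) →
      pvInv ((List.range cc).foldl
          (fun d c => pvSet2 d (r+1) (c+1) (pvG grid r c + pvGet2 d r c)) d)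
        m n (pvG1 grid m n r cc) := by
  intro cc
  induction cc with
  | zero => intro _ d h; simpa using h
  | succ cc ih =>
    intro hcc d h
    rw [List.range_succ, List.foldl_append, List.foldl_cons, List.foldl_nil]
    have hInv' := ih (by omega) d h
    have hval : pvG grid r cc + pvGet2 ((List.range cc).foldl
          (fun d c => pvSet2 d (r+1) (c+1) (pvG grid r c + pvGet2 d r c)) d) r cc
        = pvD1 grid m n (r+1) (cc+1) := by
      rw [hInv'.2.2 r cc]
      unfold pvG1
      rw [if_pos (le_refl r)]
      conv_rhs => rw [pvD1]
      rw [if_pos (by omega : 1 ≤ r+1 ∧ r+1 ≤ m ∧ 1 ≤ cc+1 ∧ cc+1 ≤ n)]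
      congr 2
    rw [hval]
    refine pvInv_congr (pvInv_set _ m n _ hInv' (r+1) (cc+1) (by omega) (by omega) _) ?_
    intro i j
    unfold pvG1
    by_cases hij : i = r+1 ∧ j = cc+1
    · obtain ⟨rfl, rfl⟩ := hij
      rw [if_pos ⟨rfl, rfl⟩, if_neg (by omega), if_pos (by omega)]
    · rw [if_neg hij]
      by_cases h1 : i ≤ r
      · rw [if_pos h1, if_pos h1]
      · rw [if_neg h1, if_neg h1]
        by_cases h2 : i = r+1 ∧ 1 ≤ j ∧ j ≤ cc
        · rw [if_pos h2, if_pos (by omega)]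
        · rw [if_neg h2, if_neg (by omega)]

-- inner column loop for d2
theorem pvInner2 (grid : List (List Int)) (m n r : Nat) (hr : r < m) :
    ∀ cc, cc ≤ n → ∀ d, pvInv d m n (pvG2 grid m n r 0) →
      pvInv ((List.range cc).foldl
          (fun d c => pvSet2 d (r+1) (c+1) (pvG grid r c + pvGet2 d r (c+2))) d)
        m n (pvG2 grid m n r cc) := by
  intro cc
  induction cc with
  | zero => intro _ d h; simpa using h
  | succ cc ih =>
    intro hcc d h
    rw [List.range_succ, List.foldl_append, List.foldl_cons, List.foldl_nil]
    have hInv' := ih (by omega) d h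
    have hval : pvG grid r cc + pvGet2 ((List.range cc).foldl
          (fun d c => pvSet2 d (r+1) (c+1) (pvG grid r c + pvGet2 d r (c+2))) d) r (cc+2)
        = pvD2 grid m n (r+1) (cc+1) := by
      rw [hInv'.2.2 r (cc+2)]
      unfold pvG2
      rw [if_pos (le_refl r)]
      conv_rhs => rw [pvD2]
      rw [if_pos (by omega : 1 ≤ r+1 ∧ r+1 ≤ m ∧ 1 ≤ cc+1 ∧ cc+1 ≤ n)]
      congr 2
    rw [hval]
    refine pvInv_congr (pvInv_set _ m n _ hInv' (r+1) (cc+1) (by omega) (by omega) _) ?_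
    intro i j
    unfold pvG2
    by_cases hij : i = r+1 ∧ j = cc+1
    · obtain ⟨rfl, rfl⟩ := hij
      rw [if_pos ⟨rfl, rfl⟩, if_neg (by omega), if_pos (by omega)]
    · rw [if_neg hij]
      by_cases h1 : i ≤ r
      · rw [if_pos h1, if_pos h1]
      · rw [if_neg h1, if_neg h1]
        by_cases h2 : i = r+1 ∧ 1 ≤ j ∧ j ≤ cc
        · rw [if_pos h2, if_pos (by omega)]
        · rw [if_neg h2, if_neg (by omega)]

-- the invariant holds for the all-zero initial table
theorem pvInv_init (m n : Nat) (F : Nat → Nat → Int) (hF : ∀ i j, F i j = 0) :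
    pvInv (List.replicate (m+2) (List.replicate (n+2) (0:Int))) m n F := by
  refine ⟨by simp, by intro row hrow; simp_all [List.eq_of_mem_replicate hrow], ?_⟩
  intro i j
  rw [hF]
  unfold pvGet2
  rcases Nat.lt_or_ge i (m+2) with hi | hi
  · simp [List.getD_eq_getElem?_getD, List.getElem?_replicate, hi]
    split <;> rfl
  · have h0 : (List.replicate (m+2) (List.replicate (n+2) (0:Int)))[i]? = none :=
      List.getElem?_eq_none (by simpa using hi)
    simp [List.getD_eq_getElem?_getD, h0]

-- row loop for d1
theorem pvOuter1 (grid : List (List Int)) (m n : Nat) :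
    ∀ k, k ≤ m →
      pvInv ((List.range k).foldl
          (fun d r => (List.range n).foldl
            (fun d c => pvSet2 d (r+1) (c+1) (pvG grid r c + pvGet2 d r c)) d)
          (List.replicate (m+2) (List.replicate (n+2) (0:Int))))
        m n (fun i j => if i ≤ k then pvD1 grid m n i j else 0) := by
  intro k
  induction k with
  | zero =>
    intro _
    refine pvInv_init m n _ ?_
    intro i j
    by_cases hi : i ≤ 0
    · rw [if_pos hi, pvD1_zero_out grid m n i j (by omega)]
    · rw [if_neg hi]
  | succ k ih =>
    intro hk
    rw [List.range_succ, List.foldl_append, List.foldl_cons, List.foldl_nil]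
    have hstart := pvInv_congr (ih (by omega)) (F' := pvG1 grid m n k 0) (by
      intro i j
      unfold pvG1
      by_cases h1 : i ≤ k
      · rw [if_pos h1, if_pos h1]
      · rw [if_neg h1, if_neg h1, if_neg (by omega)])
    refine pvInv_congr (pvInner1 grid m n k (by omega) n (le_refl n) _ hstart) ?_
    intro i j
    unfold pvG1
    by_cases h1 : i ≤ k
    · rw [if_pos h1, if_pos (by omega)]
    · rw [if_neg h1]
      by_cases h2 : i = k+1 ∧ 1 ≤ j ∧ j ≤ n
      · rw [if_pos h2, if_pos (by omega)]
      · rw [if_neg h2]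
        by_cases h3 : i ≤ k+1
        · rw [if_pos h3, pvD1_zero_out grid m n i j (by omega)]
        · rw [if_neg h3]

-- row loop for d2
theorem pvOuter2 (grid : List (List Int)) (m n : Nat) :
    ∀ k, k ≤ m →
      pvInv ((List.range k).foldl
          (fun d r => (List.range n).foldl
            (fun d c => pvSet2 d (r+1) (c+1) (pvG grid r c + pvGet2 d r (c+2))) d)
          (List.replicate (m+2) (List.replicate (n+2) (0:Int))))
        m n (fun i j => if i ≤ k then pvD2 grid m n i j else 0) := by
  intro k
  induction k with
  | zero =>
    intro _
    refine pvInv_init m n _ ?_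
    intro i j
    by_cases hi : i ≤ 0
    · rw [if_pos hi, pvD2_zero_out grid m n i j (by omega)]
    · rw [if_neg hi]
  | succ k ih =>
    intro hk
    rw [List.range_succ, List.foldl_append, List.foldl_cons, List.foldl_nil]
    have hstart := pvInv_congr (ih (by omega)) (F' := pvG2 grid m n k 0) (by
      intro i j
      unfold pvG2
      by_cases h1 : i ≤ k
      · rw [if_pos h1, if_pos h1]
      · rw [if_neg h1, if_neg h1, if_neg (by omega)])
    refine pvInv_congr (pvInner2 grid m n k (by omega) n (le_refl n) _ hstart) ?_
    intro i j
    unfold pvG2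
    by_cases h1 : i ≤ k
    · rw [if_pos h1, if_pos (by omega)]
    · rw [if_neg h1]
      by_cases h2 : i = k+1 ∧ 1 ≤ j ∧ j ≤ n
      · rw [if_pos h2, if_pos (by omega)]
      · rw [if_neg h2]
        by_cases h3 : i ≤ k+1
        · rw [if_pos h3, pvD2_zero_out grid m n i j (by omega)]
        · rw [if_neg h3]

-- the paired fold builds the two tables independently
theorem pvBuild_eq (grid : List (List Int)) (m n : Nat) :
    pvBuildTables grid m n =
      ((List.range m).foldl (fun d r => (List.range n).foldl
          (fun d c => pvSet2 d (r+1) (c+1) (pvG grid r c + pvGet2 d r c)) d)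
        (List.replicate (m+2) (List.replicate (n+2) (0:Int))),
       (List.range m).foldl (fun d r => (List.range n).foldl
          (fun d c => pvSet2 d (r+1) (c+1) (pvG grid r c + pvGet2 d r (c+2))) d)
        (List.replicate (m+2) (List.replicate (n+2) (0:Int)))) := by
  unfold pvBuildTables
  have hstep : (fun (st : List (List Int) × List (List Int)) r =>
        (List.range n).foldl (fun (st : List (List Int) × List (List Int)) c =>
          (pvSet2 st.1 (r+1) (c+1) (pvG grid r c + pvGet2 st.1 r c),
           pvSet2 st.2 (r+1) (c+1) (pvG grid r c + pvGet2 st.2 r (c+2)))) st)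
      = (fun (st : List (List Int) × List (List Int)) r =>
          ((List.range n).foldl (fun d c => pvSet2 d (r+1) (c+1) (pvG grid r c + pvGet2 d r c)) st.1,
           (List.range n).foldl (fun d c => pvSet2 d (r+1) (c+1) (pvG grid r c + pvGet2 d r (c+2))) st.2)) := by
    funext st r
    obtain ⟨a, b⟩ := st
    exact PySem.List.foldl_prod_mk
      (f := fun d c => pvSet2 d (r+1) (c+1) (pvG grid r c + pvGet2 d r c))
      (g := fun d c => pvSet2 d (r+1) (c+1) (pvG grid r c + pvGet2 d r (c+2))) _ _ _
  rw [hstep]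
  exact PySem.List.foldl_prod_mk
    (f := fun d r => (List.range n).foldl (fun d c => pvSet2 d (r+1) (c+1) (pvG grid r c + pvGet2 d r c)) d)
    (g := fun d r => (List.range n).foldl (fun d c => pvSet2 d (r+1) (c+1) (pvG grid r c + pvGet2 d r (c+2))) d) _ _ _

theorem pvTables_spec (grid : List (List Int)) (m n : Nat) :
    (∀ i j, pvGet2 (pvBuildTables grid m n).1 i j = pvD1 grid m n i j) ∧
    (∀ i j, pvGet2 (pvBuildTables grid m n).2 i j = pvD2 grid m n i j) := by
  rw [pvBuild_eq]
  constructor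
  · intro i j
    rw [(pvOuter1 grid m n m (le_refl m)).2.2 i j]
    show (if i ≤ m then pvD1 grid m n i j else 0) = pvD1 grid m n i j
    by_cases hi : i ≤ m
    · rw [if_pos hi]
    · rw [if_neg hi, pvD1_zero_out grid m n i j (by omega)]
  · intro i j
    rw [(pvOuter2 grid m n m (le_refl m)).2.2 i j]
    show (if i ≤ m then pvD2 grid m n i j else 0) = pvD2 grid m n i j
    by_cases hi : i ≤ m
    · rw [if_pos hi]
    · rw [if_neg hi, pvD2_zero_out grid m n i j (by omega)]

-- ===== telescoping =====

theorem pvT1 (grid : List (List Int)) (m n a b k : Nat)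
    (hak : a + k ≤ m) (hbk : b + k ≤ n) :
    pvD1 grid m n (a+k) (b+k) - pvD1 grid m n a b
      = (((List.range k).map (fun t => pvG grid (a+t) (b+t))).sum) := by
  induction k with
  | zero => simp
  | succ k ih =>
    have h1 : pvD1 grid m n (a+(k+1)) (b+(k+1)) = pvG grid (a+k) (b+k) + pvD1 grid m n (a+k) (b+k) := by
      rw [pvD1]; simp only [if_pos (by omega : 1 ≤ a+(k+1) ∧ a+(k+1) ≤ m ∧ 1 ≤ b+(k+1) ∧ b+(k+1) ≤ n)]
      congr 1
    rw [h1, List.range_succ, List.map_append, List.sum_append]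
    have := ih (by omega) (by omega)
    simp only [List.map_cons, List.map_nil, List.sum_cons, List.sum_nil]
    omega

theorem pvT2 (grid : List (List Int)) (m n a b k : Nat)
    (hb : 1 ≤ b) (hak : a + k ≤ m) (hbk : b + k ≤ n + 1) :
    pvD2 grid m n (a+k) b - pvD2 grid m n a (b+k)
      = (((List.range k).map (fun t => pvG grid (a+k-1-t) (b-1+t))).sum) := by
  induction k generalizing b with
  | zero => simp
  | succ k ih =>
    have h1 : pvD2 grid m n (a+(k+1)) b = pvG grid (a+k) (b-1) + pvD2 grid m n (a+k) (b+1) := by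
      rw [pvD2]; simp only [if_pos (by omega : 1 ≤ a+(k+1) ∧ a+(k+1) ≤ m ∧ 1 ≤ b ∧ b ≤ n)]
      congr 1
    have h2 := ih (b+1) (by omega) (by omega) (by omega)
    rw [h1, List.range_succ_eq_map]
    simp only [List.map_cons, List.sum_cons, List.map_map]
    have hf0 : pvG grid (a+(k+1)-1-0) (b-1+0) = pvG grid (a+k) (b-1) := by
      congr 1
    have key : ((List.range k).map ((fun t => pvG grid (a+(k+1)-1-t) (b-1+t)) ∘ Nat.succ)).sum
         = ((List.range k).map (fun t => pvG grid (a+k-1-t) (b+1-1+t))).sum := by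
      apply congrArg; apply List.map_congr_left; intro t ht
      have ht' := List.mem_range.mp ht
      simp only [Function.comp_apply]
      congr 1 <;> omega
    have e3 : pvD2 grid m n a (b+(k+1)) = pvD2 grid m n a (b+1+k) := by congr 1; omega
    rw [hf0, key, e3]
    omega

-- endpoint-form corollaries of the telescopes (atoms match the ports' index expressions)
theorem pvT1' (grid : List (List Int)) (m n a b a' b' k : Nat)
    (ha : a' = a + k) (hb : b' = b + k) (ham : a' ≤ m) (hbn : b' ≤ n) :
    pvD1 grid m n a' b' - pvD1 grid m n a b
      = ((List.range k).map (fun t => pvG grid (a+t) (b+t))).sum := by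
  subst ha hb; exact pvT1 grid m n a b k ham hbn

theorem pvT2' (grid : List (List Int)) (m n a b a' b' k : Nat)
    (ha : a' = a + k) (hb' : b' = b + k) (hb : 1 ≤ b) (ham : a' ≤ m) (hbn : b' ≤ n + 1) :
    pvD2 grid m n a' b - pvD2 grid m n a b'
      = ((List.range k).map (fun t => pvG grid (a+k-1-t) (b-1+t))).sum := by
  subst ha hb'; exact pvT2 grid m n a b k hb ham hbn

-- reversing the summation order
theorem pvSum_reflect (f g : Nat → Int) : ∀ k, (∀ i, i < k → f i = g (k-1-i)) →
    ((List.range k).map f).sum = ((List.range k).map g).sum := by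
  intro k
  induction k generalizing f g with
  | zero => intro _; rfl
  | succ k ih =>
    intro h
    have hg : ((List.range (k+1)).map g).sum = g 0 + ((List.range k).map (g ∘ Nat.succ)).sum := by
      rw [List.range_succ_eq_map]
      simp [List.map_map]
    rw [hg, List.range_succ, List.map_append, List.sum_append]
    simp only [List.map_cons, List.map_nil, List.sum_cons, List.sum_nil]
    have h0 : f k = g 0 := by have := h k (by omega); simpa using this
    have htail : ((List.range k).map f).sum
        = ((List.range k).map (g ∘ Nat.succ)).sum := by
      apply ih
      intro i hi
      have := h i (by omega)
      rw [this]
      simp only [Function.comp_apply]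
      congr 1
      omega
    rw [h0, htail]
    ring

theorem pvG_congr (grid : List (List Int)) {a b a' b' : Nat} (ha : a = a') (hb : b = b') :
    pvG grid a b = pvG grid a' b' := by rw [ha, hb]

-- the analytic core: A's prefix-table expression = B's direct border walk
theorem pvCur_eq (grid : List (List Int)) (m n r c L : Nat)
    (hL : 1 ≤ L) (h1 : r + 2*L < m) (h2 : L ≤ c) (h3 : c + L < n) :
    (pvD2 grid m n (r+L+1) (((c:Int) - (L:Int)).toNat+1) - pvD2 grid m n r (c+2))
    + (pvD1 grid m n (r+2*L+1) (c+1) - pvD1 grid m n (r+L) ((c:Int) - (L:Int)).toNat)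
    + (pvD2 grid m n (r+2*L+1) (c+1) - pvD2 grid m n (r+L) (c+L+2))
    + (pvD1 grid m n (r+L+1) (c+L+1) - pvD1 grid m n r c)
    - pvG grid r c - pvG grid (r+2*L) c
    - pvG grid (r+L) ((c:Int) - (L:Int)).toNat - pvG grid (r+L) (c+L)
    = pvBorderSum grid r c L := by
  have hcl : ((c:Int) - (L:Int)).toNat = c - L := by omega
  rw [hcl]
  have t1 := pvT2' grid m n r (c-L+1) (r+L+1) (c+2) (L+1)
    (by omega) (by omega) (by omega) (by omega) (by omega)
  have t2 := pvT1' grid m n (r+L) (c-L) (r+2*L+1) (c+1) (L+1)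
    (by omega) (by omega) (by omega) (by omega)
  have t3 := pvT2' grid m n (r+L) (c+1) (r+2*L+1) (c+L+2) (L+1)
    (by omega) (by omega) (by omega) (by omega) (by omega)
  have t4 := pvT1' grid m n r c (r+L+1) (c+L+1) (L+1)
    (by omega) (by omega) (by omega) (by omega)
  have e1 : ((List.range (L+1)).map (fun t => pvG grid (r+(L+1)-1-t) (c-L+1-1+t))).sum
      = pvG grid (r+L) (c-L) + ((List.range L).map (fun i => pvG grid (r+i) (c-i))).sum := by
    rw [List.range_succ_eq_map]
    simp only [List.map_cons, List.sum_cons, List.map_map]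
    have hhead : pvG grid (r+(L+1)-1-0) (c-L+1-1+0) = pvG grid (r+L) (c-L) :=
      pvG_congr grid (by omega) (by omega)
    have htail : ((List.range L).map ((fun t => pvG grid (r+(L+1)-1-t) (c-L+1-1+t)) ∘ Nat.succ)).sum
        = ((List.range L).map (fun i => pvG grid (r+i) (c-i))).sum := by
      apply pvSum_reflect
      intro i hi
      simp only [Function.comp_apply]
      exact pvG_congr grid (by omega) (by omega)
    rw [hhead, htail]
  have e2 : ((List.range (L+1)).map (fun t => pvG grid (r+L+t) (c-L+t))).sum
      = ((List.range L).map (fun i => pvG grid (r+L+i) (c-L+i))).sum + pvG grid (r+2*L) c := by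
    rw [List.range_succ, List.map_append, List.sum_append]
    simp only [List.map_cons, List.map_nil, List.sum_cons, List.sum_nil]
    have hlast : pvG grid (r+L+L) (c-L+L) = pvG grid (r+2*L) c :=
      pvG_congr grid (by omega) (by omega)
    rw [hlast]
    omega
  have e3 : ((List.range (L+1)).map (fun t => pvG grid (r+L+(L+1)-1-t) (c+1-1+t))).sum
      = ((List.range L).map (fun i => pvG grid (r+2*L-i) (c+i))).sum + pvG grid (r+L) (c+L) := by
    rw [List.range_succ, List.map_append, List.sum_append]
    simp only [List.map_cons, List.map_nil, List.sum_cons, List.sum_nil]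
    have hlast : pvG grid (r+L+(L+1)-1-L) (c+1-1+L) = pvG grid (r+L) (c+L) :=
      pvG_congr grid (by omega) (by omega)
    have htail : ((List.range L).map (fun t => pvG grid (r+L+(L+1)-1-t) (c+1-1+t))).sum
        = ((List.range L).map (fun i => pvG grid (r+2*L-i) (c+i))).sum := by
      apply congrArg
      apply List.map_congr_left
      intro t ht
      have ht' := List.mem_range.mp ht
      exact pvG_congr grid (by omega) (by omega)
    rw [hlast, htail]
    omega
  have e4 : ((List.range (L+1)).map (fun t => pvG grid (r+t) (c+t))).sum
      = pvG grid r c + ((List.range L).map (fun i => pvG grid (r+L-i) (c+L-i))).sum := by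
    rw [List.range_succ_eq_map]
    simp only [List.map_cons, List.sum_cons, List.map_map]
    have hhead : pvG grid (r+0) (c+0) = pvG grid r c :=
      pvG_congr grid (by omega) (by omega)
    have htail : ((List.range L).map ((fun t => pvG grid (r+t) (c+t)) ∘ Nat.succ)).sum
        = ((List.range L).map (fun i => pvG grid (r+L-i) (c+L-i))).sum := by
      apply pvSum_reflect
      intro i hi
      simp only [Function.comp_apply]
      exact pvG_congr grid (by omega) (by omega)
    rw [hhead, htail]
  have hB : pvBorderSum grid r c L
      = ((List.range L).map (fun i => pvG grid (r+i) (c-i))).sum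
      + ((List.range L).map (fun i => pvG grid (r+L+i) (c-L+i))).sum
      + ((List.range L).map (fun i => pvG grid (r+2*L-i) (c+i))).sum
      + ((List.range L).map (fun i => pvG grid (r+L-i) (c+L-i))).sum := by
    unfold pvBorderSum
    rw [PySem.List.foldl_add]
    simp only [PySem.List.sum_map_add_int]
    ring
  omega

-- A's rhombus loop produces exactly B's, given the table characterisation
theorem pvRhomb_eq (grid d1 d2 : List (List Int)) (m n r c : Nat)
    (hd1 : ∀ i j, pvGet2 d1 i j = pvD1 grid m n i j)
    (hd2 : ∀ i j, pvGet2 d2 i j = pvD2 grid m n i j) :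
    ∀ fuel L, m - L = fuel → 1 ≤ L → ∀ acc,
      pvRhombA grid d1 d2 m n r c L acc = pvRhombB grid m n r c L acc := by
  intro fuel
  induction fuel with
  | zero =>
    intro L hfuel hL acc
    rw [pvRhombA, pvRhombB, dif_neg (by omega), dif_neg (by omega)]
  | succ fuel ih =>
    intro L hfuel hL acc
    rw [pvRhombA, pvRhombB, dif_pos (by omega : L < m), dif_pos (by omega : L < m)]
    by_cases hg : r + 2*L ≥ m ∨ (c:Int) - (L:Int) < 0 ∨ c + L ≥ n
    · rw [if_pos hg, if_pos hg]
    · rw [if_neg hg, if_neg hg]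
      have hbd : r + 2*L < m ∧ L ≤ c ∧ c + L < n := by
        push Not at hg
        refine ⟨by omega, by omega, by omega⟩
      have hcur : (pvGet2 d2 (r+L+1) (((c:Int) - (L:Int)).toNat+1) - pvGet2 d2 r (c+2))
          + (pvGet2 d1 (r+2*L+1) (c+1) - pvGet2 d1 (r+L) ((c:Int) - (L:Int)).toNat)
          + (pvGet2 d2 (r+2*L+1) (c+1) - pvGet2 d2 (r+L) (c+L+2))
          + (pvGet2 d1 (r+L+1) (c+L+1) - pvGet2 d1 r c)
          - pvG grid r c - pvG grid (r+2*L) c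
          - pvG grid (r+L) ((c:Int) - (L:Int)).toNat - pvG grid (r+L) (c+L)
          = pvBorderSum grid r c L := by
        simp only [hd1, hd2]
        exact pvCur_eq grid m n r c L hL hbd.1 hbd.2.1 hbd.2.2
      rw [hcur]
      exact ih (L+1) (by omega) (by omega) _

-- the whole programs agree
theorem pvMain (grid : List (List Int)) : getBiggestThree grid = getBiggestThree_alt grid := by
  obtain ⟨hd1, hd2⟩ := pvTables_spec grid grid.length (grid.getD 0 []).length
  simp only [getBiggestThree, getBiggestThree_alt]
  refine congrArg (fun s : PySem.Set Int =>
    PySem.List.slice (PySem.List.sorted s (fun x => x) true) none (some 3)) ?_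
  apply PySem.List.foldl_congr_mem
  intro acc r _
  apply PySem.List.foldl_congr_mem
  intro acc' c _
  exact pvRhomb_eq grid _ _ _ _ r c hd1 hd2 (grid.length - 1) 1 rfl (le_refl 1) _

-- ===== VERDICT (by name: the statement is the Claim_ definition above) =====
theorem getBiggestThree_spec : Claim_equal_getBiggestThree := by
  intro grid _ _
  unfold Spec_getBiggestThree
  exact pvMain grid
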